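-- pv_equiv track=rewrite | github.com/ipaste01/ThesisUCY-QAOA | Algorithm-2/TSP.py | coefficients
-- ===== SOURCE A (Python) =====
-- def coefficients(V,x,length):
--   while len(x) < length:
--       x.insert(0,0)
--
--   # find coefficents
--   K = []
--   c = [0]*V
--   z = 0
--   for i in range(V):
--    for j in range(i+1,V):
--       if x[z] == 1 :
--          c[i] = 1
--          c[j] = 1
--          K.append(c)
--       z = z + 1
--       c = [0]*V
--   '''for edge in E:
--     c[edge[0]] = 1
--     c[edge[1]] = 1
--     K.append(c)
--     c = [0]*len(V)'''
--   return K
-- ===== SOURCE B (Python) =====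
-- from math import isqrt
--
-- def coefficients(V, x, length):
--     # same in-place padding as the original (mutates x)
--     x[:0] = [0] * max(0, length - len(x))
--     m = V * (V - 1) // 2 if V > 1 else 0
--     K = []
--     for z in range(m):
--         if x[z] == 1:
--             r = m - 1 - z
--             t = (isqrt(8 * r + 1) - 1) // 2
--             i = V - 2 - t
--             j = z + i + 1 - i * (2 * V - i - 1) // 2
--             c = [0] * V
--             c[i] = 1
--             c[j] = 1
--             K.append(c)
--     return K
-- ===== Notes on version B (the rewrite author's own statement) =====
-- stated objective: alternative
-- what changed: Replaces A's nested i<j double loop with a running edge counter by a single flat loop over z in range(V*(V-1)//2) that recovers the pair (i,j) from z in closed form via math.isqrt (triangular-index inversion); padding of x is done in one slice assignment instead of a while loop of insert(0,0).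
-- outside the precondition, e.g. on coefficients(3, [1, 1], 2): A raises IndexError, B raises IndexError
import Mathlib
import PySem

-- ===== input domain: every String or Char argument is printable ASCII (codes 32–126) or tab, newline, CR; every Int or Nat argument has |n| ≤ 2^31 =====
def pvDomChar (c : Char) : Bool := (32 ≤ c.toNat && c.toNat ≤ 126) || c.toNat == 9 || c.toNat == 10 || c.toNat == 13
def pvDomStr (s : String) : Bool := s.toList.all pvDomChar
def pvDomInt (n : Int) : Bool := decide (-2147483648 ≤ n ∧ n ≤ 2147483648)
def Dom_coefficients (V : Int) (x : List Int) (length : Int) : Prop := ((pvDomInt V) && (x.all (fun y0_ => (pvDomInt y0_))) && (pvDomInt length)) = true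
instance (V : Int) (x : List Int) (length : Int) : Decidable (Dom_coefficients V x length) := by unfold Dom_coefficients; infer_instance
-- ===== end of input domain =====

-- B replaces A's nested i<j double loop with a running counter by a single flat loop over
-- z in range(V*(V-1)//2), recovering the pair (i,j) from z in closed form via math.isqrt
-- (objective: alternative decomposition).  Both A and B pad x in place with leading zeros
-- (the proved equivalence is about the return value; B performs the same mutation of x).

-- ===== PORT A =====
-- c = [0]*V; c[i] = 1; c[j] = 1   (i, j are nonnegative wherever either program builds c)
def pvVec (V i j : Int) : List Int :=
  ((List.replicate V.toNat (0 : Int)).set i.toNat 1).set j.toNat 1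

-- while len(x) < length: x.insert(0, 0)
def pvPad (x : List Int) (length : Int) : List Int :=
  if (x.length : Int) < length then pvPad (0 :: x) length else x
termination_by (length - (x.length : Int)).toNat
decreasing_by simp; omega

def coefficients (V : Int) (x : List Int) (length : Int) : List (List Int) :=
  let xp := pvPad x length
  ((PySem.List.pyRange 0 V 1).foldl (fun (s : List (List Int) × Int) i =>
    (PySem.List.pyRange (i + 1) V 1).foldl (fun (t : List (List Int) × Int) j =>
      (if PySem.List.pyGetD xp t.2 0 = 1 then t.1 ++ [pvVec V i j] else t.1, t.2 + 1)) s)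
    ([], 0)).1

-- ===== PORT B =====
def pvIsqrt (n : Int) : Int := (Nat.sqrt n.toNat : Int)   -- exact for 0 ≤ n (math.isqrt)

def pvDecode (V m z : Int) : Int × Int :=
  let r := m - 1 - z
  let t := PySem.Int.floordiv (pvIsqrt (8 * r + 1) - 1) 2
  let i := V - 2 - t
  (i, z + i + 1 - PySem.Int.floordiv (i * (2 * V - i - 1)) 2)

def coefficients_alt (V : Int) (x : List Int) (length : Int) : List (List Int) :=
  let xp := List.replicate (max 0 (length - (x.length : Int))).toNat (0 : Int) ++ x
  let m := if V > 1 then PySem.Int.floordiv (V * (V - 1)) 2 else 0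
  (PySem.List.pyRange 0 m 1).foldl (fun K z =>
    if PySem.List.pyGetD xp z 0 = 1 then
      let p := pvDecode V m z
      K ++ [pvVec V p.1 p.2]
    else K) []

-- ===== PRECONDITION & SPEC =====
-- Pre_ excludes exactly the inputs where A raises IndexError: V ≥ 2 with fewer than
-- V*(V-1)//2 entries in x even after padding to `length`.
def Pre_coefficients (V : Int) (x : List Int) (length : Int) : Prop :=
  V ≤ 1 ∨ PySem.Int.floordiv (V * (V - 1)) 2 ≤ max (x.length : Int) length
instance (V : Int) (x : List Int) (length : Int) : Decidable (Pre_coefficients V x length) := by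
  unfold Pre_coefficients; infer_instance

def pvWitness_coefficients : Int × List Int × Int := (4, [1, 0, 1, 0, 1, 0], 6)

def Spec_coefficients (V : Int) (x : List Int) (length : Int) (out : List (List Int)) : Prop :=
  out = coefficients_alt V x length
instance (V : Int) (x : List Int) (length : Int) (out : List (List Int)) :
    Decidable (Spec_coefficients V x length out) := by unfold Spec_coefficients; infer_instance

-- ===== CLAIM (what is proved, stated in full; the proofs are below) =====
def Claim_equal_coefficients : Prop := ∀ (V : Int) (x : List Int) (length : Int),
  Dom_coefficients V x length → Pre_coefficients V x length →
  Spec_coefficients V x length (coefficients V x length)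

-- ===== LEMMAS AND PROOFS =====

theorem pvPad_eq (x : List Int) (L : Int) :
    pvPad x L = List.replicate (max 0 (L - (x.length : Int))).toNat (0 : Int) ++ x := by
  fun_induction pvPad x L with
  | case1 x h ih =>
      rw [ih]
      have : (max 0 (L - ((0 :: x).length : Int))).toNat + 1
           = (max 0 (L - (x.length : Int))).toNat := by simp; omega
      rw [← this, List.replicate_succ']
      simp
  | case2 x h =>
      have : (max 0 (L - (x.length : Int))).toNat = 0 := by omega
      simp [this]

theorem pvIsqrt_eq (n q : Int) (h0 : 0 ≤ q) (h1 : q * q ≤ n) (h2 : n < (q + 1) * (q + 1)) :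
    pvIsqrt n = q := by
  unfold pvIsqrt
  have hn : 0 ≤ n := le_trans (mul_self_nonneg q) h1
  have hl : q.toNat ≤ Nat.sqrt n.toNat := by
    rw [Nat.le_sqrt]
    zify [Int.toNat_of_nonneg h0, Int.toNat_of_nonneg hn]
    exact h1
  have hr : Nat.sqrt n.toNat < q.toNat + 1 := by
    rw [Nat.sqrt_lt]
    zify [Int.toNat_of_nonneg h0, Int.toNat_of_nonneg hn]
    nlinarith
  omega

theorem pvFloordiv_two (a q : Int) (h : q * 2 ≤ a) (h2 : a < (q + 1) * 2) :
    PySem.Int.floordiv a 2 = q := by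
  rw [PySem.Int.floordiv_eq_iff_of_pos (by omega)]
  omega

-- the closed-form decode recovers A's (i, j) enumeration
theorem pvDecode_eq (V m s a k : Int) (hm : 2 * m = V * (V - 1))
    (hs : 2 * (m - s) = (V - a) * (V - a - 1))
    (_ha : 0 ≤ a) (hk : 0 ≤ k) (hkV : k < V - 1 - a) :
    pvDecode V m (s + k) = (a, a + 1 + k) := by
  have hu : 2 ≤ V - a := by omega
  set u : Int := V - a with hu_def
  have h8 : 8 * (m - 1 - (s + k)) + 1 = 4 * u * (u - 1) - 8 * k - 7 := by
    nlinarith [hs]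
  have hsq : pvIsqrt (8 * (m - 1 - (s + k)) + 1) = 2 * u - 3 ∨
      pvIsqrt (8 * (m - 1 - (s + k)) + 1) = 2 * u - 2 := by
    rw [h8]
    by_cases hc : 4 * u * (u - 1) - 8 * k - 7 ≤ (2 * u - 2) * (2 * u - 2) - 1
    · left
      apply pvIsqrt_eq _ _ (by omega)
      · nlinarith
      · nlinarith
    · right
      apply pvIsqrt_eq _ _ (by omega)
      · nlinarith
      · nlinarith
  have ht : PySem.Int.floordiv (pvIsqrt (8 * (m - 1 - (s + k)) + 1) - 1) 2 = u - 2 := by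
    rcases hsq with h | h <;> rw [h] <;> apply pvFloordiv_two <;> omega
  have hbase : PySem.Int.floordiv (a * (2 * V - a - 1)) 2 = s := by
    apply pvFloordiv_two <;> nlinarith [hm, hs]
  unfold pvDecode
  simp only [ht]
  have hi : V - 2 - (u - 2) = a := by omega
  rw [hi, hbase]
  have hj : s + k + a + 1 - s = a + 1 + k := by omega
  rw [hj]

-- A's pair enumeration written blockwise equals the decoded flat range
theorem pvBlocks (V m : Int) (hm : 2 * m = V * (V - 1)) :
    ∀ (d : Nat) (a s : Int), a + d = V → 0 ≤ a →
    2 * (m - s) = (V - a) * (V - a - 1) →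
    (PySem.List.pyRange a V 1).flatMap
      (fun i => (PySem.List.pyRange (i + 1) V 1).map (fun j => (i, j)))
    = (PySem.List.pyRange s m 1).map (pvDecode V m) := by
  intro d
  induction d with
  | zero =>
      intro a s haV ha hs
      have h1 : a = V := by omega
      have h2 : s = m := by nlinarith
      rw [PySem.List.pyRange_one_eq_nil (by omega), PySem.List.pyRange_one_eq_nil (by omega)]
      simp
  | succ d ih =>
      intro a s haV ha hs
      have haV' : a < V := by omega
      have hs' : 2 * (m - (s + (V - 1 - a))) = (V - (a + 1)) * (V - (a + 1) - 1) := by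
        nlinarith
      have hsle : s ≤ s + (V - 1 - a) := by omega
      have hsm : s + (V - 1 - a) ≤ m := by nlinarith [sq_nonneg (2 * (V - a) - 3)]
      rw [PySem.List.pyRange_one_cons haV', List.flatMap_cons,
        ih (a + 1) (s + (V - 1 - a)) (by omega) (by omega) hs',
        PySem.List.pyRange_one_append s (s + (V - 1 - a)) m hsle hsm, List.map_append]
      congr 1
      rw [PySem.List.pyRange_one (a + 1) V, PySem.List.pyRange_one s (s + (V - 1 - a))]
      have hlen : (V - (a + 1)).toNat = (s + (V - 1 - a) - s).toNat := by omega
      rw [hlen, List.map_map, List.map_map]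
      apply List.map_congr_left
      intro k hk
      simp only [List.mem_range] at hk
      simp only [Function.comp_apply]
      rw [pvDecode_eq V m s a k hm hs (by omega) (by omega) (by omega)]

-- nested foldl over i then j = foldl over the flattened pair list
theorem pvFoldNested {σ : Type} (l : List Int) (g : Int → List Int)
    (F : σ → Int → Int → σ) (init : σ) :
    l.foldl (fun s i => (g i).foldl (fun s j => F s i j) s) init
    = (l.flatMap (fun i => (g i).map (fun j => (i, j)))).foldl
        (fun s p => F s p.1 p.2) init := by
  induction l generalizing init with
  | nil => simp
  | cons i l ih => simp [List.foldl_append, List.foldl_map, ih]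

-- the running counter z coincides with the range element being consumed
theorem pvCounterFold (F : List (List Int) → Int → Int → List (List Int)) :
    ∀ (d : Nat) (a b : Int) (K : List (List Int)), (b - a).toNat = d →
    (PySem.List.pyRange a b 1).foldl (fun s z => (F s.1 s.2 z, s.2 + 1)) (K, a)
    = ((PySem.List.pyRange a b 1).foldl (fun K z => F K z z) K, max a b) := by
  intro d
  induction d with
  | zero =>
      intro a b K h
      rw [PySem.List.pyRange_one_eq_nil (by omega)]
      simp; omega
  | succ d ih =>
      intro a b K h
      have hab : a < b := by omega
      rw [PySem.List.pyRange_one_cons hab]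
      simp only [List.foldl_cons]
      rw [ih (a + 1) b (F K a a) (by omega)]
      congr 1
      omega

theorem coefficients_eq_alt (V : Int) (x : List Int) (length : Int) :
    coefficients V x length = coefficients_alt V x length := by
  unfold coefficients coefficients_alt
  rw [pvPad_eq]
  set xp := List.replicate (max 0 (length - (x.length : Int))).toNat (0 : Int) ++ x with hxp
  by_cases hV : V > 1
  · simp only [if_pos hV]
    set m := PySem.Int.floordiv (V * (V - 1)) 2 with hmdef
    have hm : 2 * m = V * (V - 1) := by
      rcases Int.even_mul_succ_self (V - 1) with ⟨c, hc⟩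
      have hfc : PySem.Int.floordiv (V * (V - 1)) 2 = c := by
        apply pvFloordiv_two <;> nlinarith
      rw [hmdef, hfc]
      linear_combination -hc
    rw [pvFoldNested (σ := List (List Int) × Int)]
    rw [pvBlocks V m hm V.toNat 0 0 (by omega) (by omega) (by nlinarith)]
    rw [List.foldl_map]
    have h0m : (0 : Int) ≤ m := by nlinarith
    rw [pvCounterFold (fun K z w => if PySem.List.pyGetD xp z 0 = 1
          then K ++ [pvVec V (pvDecode V m w).1 (pvDecode V m w).2] else K)
        (m - 0).toNat 0 m [] rfl]
  · simp only [if_neg hV]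
    rw [PySem.List.pyRange_one_eq_nil (le_refl 0)]
    by_cases h0 : V ≤ 0
    · rw [PySem.List.pyRange_one_eq_nil h0]
      simp
    · have h1 : V = 1 := by omega
      subst h1
      rw [PySem.List.pyRange_one_cons (by omega), PySem.List.pyRange_one_eq_nil (by omega)]
      simp

-- ===== VERDICT (by name: the statement is the Claim_ definition above) =====
theorem coefficients_spec : Claim_equal_coefficients := by
  intro V x length _ _
  unfold Spec_coefficients
  exact coefficients_eq_alt V x length
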